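-- pv_equiv track=rewrite | github.com/JakeLehle/Network-Architecture-of-APOBEC3-Driven-Mutagenesis-in-HPV-Head-and-Neck-Cancers | scripts/SINGLE_CELL/TROUBLESHOOTING/2025-05-29_SC_Cluster_Annotation.py | sort_by_substrings
-- ===== SOURCE A (Python) =====
-- def sort_by_substrings(list_of_strings, substring):
--     with_substring = []
--     without_substring = []
--     for string in list_of_strings:
--         if substring in string:
--             with_substring.append(string)
--         else:
--             without_substring.append(string)
--
--     return with_substring + without_substring
-- ===== SOURCE B (Python) =====
-- def sort_by_substrings(list_of_strings, substring):
--     return sorted(list_of_strings, key=lambda s: substring not in s)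
-- ===== Notes on version B (the rewrite author's own statement) =====
-- stated objective: idiomatic
-- what changed: Replaced the explicit two-list partition-and-concatenate loop with a single stable key-sort (sorted with key 'substring not in s'), whose stability keeps each group's original order with matches first.
import Mathlib
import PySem

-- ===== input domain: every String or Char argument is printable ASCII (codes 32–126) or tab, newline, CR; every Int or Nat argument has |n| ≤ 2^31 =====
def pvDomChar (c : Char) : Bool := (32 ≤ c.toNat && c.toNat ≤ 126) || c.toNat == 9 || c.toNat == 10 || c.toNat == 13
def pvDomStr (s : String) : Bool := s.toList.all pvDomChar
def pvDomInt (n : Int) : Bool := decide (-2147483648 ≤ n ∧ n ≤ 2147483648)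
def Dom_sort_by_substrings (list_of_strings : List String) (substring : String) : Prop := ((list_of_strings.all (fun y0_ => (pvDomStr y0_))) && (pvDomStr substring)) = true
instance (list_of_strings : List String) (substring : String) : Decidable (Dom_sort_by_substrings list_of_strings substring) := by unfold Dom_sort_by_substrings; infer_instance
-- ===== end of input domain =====

-- B replaces A's explicit two-list partition-and-concatenate with a single stable key-sort
-- (matches get key 0, non-matches key 1); stability keeps each group's original order (idiomatic).


-- ===== PORT A =====
-- literal port of A: one pass appending each string to with_substring or without_substring,
-- then with_substring + without_substring
def sort_by_substrings (list_of_strings : List String) (substring : String) : List String :=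
  let st := list_of_strings.foldl
    (fun (acc : List String × List String) s =>
      if PySem.Str.isIn substring s then (acc.1 ++ [s], acc.2) else (acc.1, acc.2 ++ [s]))
    ([], [])
  st.1 ++ st.2

-- ===== PORT B =====
-- port of B: sorted(list_of_strings, key=lambda s: substring not in s); the Python bool key
-- (False < True) is encoded as Nat 0/1, the stable sort is PySem.List.sorted
def sort_by_substrings_alt (list_of_strings : List String) (substring : String) : List String :=
  PySem.List.sorted list_of_strings (fun s => if PySem.Str.isIn substring s then (0 : Nat) else 1)

-- ===== PRECONDITION & SPEC =====
def Spec_sort_by_substrings (list_of_strings : List String) (substring : String) (out : List String) : Prop := out = sort_by_substrings_alt list_of_strings substring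
instance (list_of_strings : List String) (substring : String) (out : List String) : Decidable (Spec_sort_by_substrings list_of_strings substring out) := by unfold Spec_sort_by_substrings; infer_instance

-- ===== CLAIM (what is proved, stated in full; the proofs are below) =====
def Claim_equal_sort_by_substrings : Prop := ∀ (list_of_strings : List String) (substring : String), Dom_sort_by_substrings list_of_strings substring → Spec_sort_by_substrings list_of_strings substring (sort_by_substrings list_of_strings substring)

-- ===== LEMMAS AND PROOFS =====

-- the 0/1 key of B, abstract in the predicate p
def pvKey {α : Type} (p : α → Bool) (x : α) : Nat := if p x then 0 else 1

-- inserting a matching element (key 0) into "matches ++ non-matches" lands right after the matches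
theorem pv_insertBy_true {α : Type} (p : α → Bool) (x : α) (F W : List α)
    (hF : ∀ y ∈ F, p y = true) (hW : ∀ y ∈ W, p y = false) (hx : p x = true) :
    PySem.List.insertBy (fun a b => decide (pvKey p a < pvKey p b)) x (F ++ W)
      = F ++ x :: W := by
  induction F with
  | nil =>
    cases W with
    | nil => simp [PySem.List.insertBy]
    | cons w ws =>
      have hw : p w = false := hW w (by simp)
      simp [PySem.List.insertBy, pvKey, hx, hw]
  | cons f F ih =>
    have hf : p f = true := hF f (by simp)
    simp [PySem.List.insertBy, pvKey, hx, hf]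
    exact ih (fun y hy => hF y (by simp [hy]))

-- inserting a non-matching element (key 1) appends it at the end
theorem pv_insertBy_false {α : Type} (p : α → Bool) (x : α) (L : List α)
    (hx : p x = false) :
    PySem.List.insertBy (fun a b => decide (pvKey p a < pvKey p b)) x L = L ++ [x] := by
  apply PySem.List.insertBy_of_forall_not_before
  intro y _
  cases hy : p y <;> simp [pvKey, hx, hy]

-- loop invariant: A's pair-accumulator fold, concatenated, equals B's insertion fold
theorem pv_fold_eq {α : Type} (p : α → Bool) (l : List α) (F W : List α)
    (hF : ∀ y ∈ F, p y = true) (hW : ∀ y ∈ W, p y = false) :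
    (l.foldl (fun (acc : List α × List α) s =>
        if p s then (acc.1 ++ [s], acc.2) else (acc.1, acc.2 ++ [s])) (F, W)).1
      ++ (l.foldl (fun (acc : List α × List α) s =>
        if p s then (acc.1 ++ [s], acc.2) else (acc.1, acc.2 ++ [s])) (F, W)).2
    = l.foldl (fun acc x => PySem.List.insertBy (fun a b => decide (pvKey p a < pvKey p b)) x acc)
        (F ++ W) := by
  induction l generalizing F W with
  | nil => simp
  | cons x l ih =>
    cases hx : p x with
    | true =>
      have h := ih (F ++ [x]) W
        (fun y hy => by rcases List.mem_append.1 hy with h | h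
                        · exact hF y h
                        · simp at h; simpa [h] using hx)
        hW
      rw [List.foldl_cons, List.foldl_cons, if_pos hx,
        pv_insertBy_true p x F W hF hW hx]
      simpa using h
    | false =>
      have h := ih F (W ++ [x]) hF
        (fun y hy => by rcases List.mem_append.1 hy with h | h
                        · exact hW y h
                        · simp at h; simpa [h] using hx)
      rw [List.foldl_cons, List.foldl_cons, if_neg (by simp [hx]),
        pv_insertBy_false p x (F ++ W) hx]
      simpa [List.append_assoc] using h

-- ===== VERDICT (by name: the statement is the Claim_ definition above) =====
theorem sort_by_substrings_spec : Claim_equal_sort_by_substrings := by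
  intro l sub _
  unfold Spec_sort_by_substrings sort_by_substrings sort_by_substrings_alt
  rw [PySem.List.sorted_eq_foldl_insertBy]
  have h := pv_fold_eq (fun s => PySem.Str.isIn sub s) l [] []
    (by simp) (by simp)
  simpa [pvKey] using h
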